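-- pv_equiv track=rewrite | github.com/taimei-1024/cursor-plugins | plugins/confluence-editor/skills/confluence-editor/scripts/cf_section.py | _build_text_to_html_map
-- ===== SOURCE A (Python) =====
-- def _build_text_to_html_map(html):
--     """Build a mapping from plain text positions to HTML positions.
--
--     Returns (plain_text, mapping) where mapping[text_pos] = html_pos.
--     """
--     mapping = []  # mapping[i] = html position for plain_text[i]
--     plain_chars = []
--     i = 0
--     while i < len(html):
--         if html[i] == "<":
--             # Skip entire tag
--             end = html.find(">", i)
--             if end == -1:
--                 break
--             i = end + 1
--         else:
--             mapping.append(i)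
--             plain_chars.append(html[i])
--             i += 1
--
--     return "".join(plain_chars), mapping
-- ===== SOURCE B (Python) =====
-- def _build_text_to_html_map(html):
--     """Build a mapping from plain text positions to HTML positions.
--
--     Finite-state machine: one uniform pass over every index with an
--     inside_tag flag; an unterminated '<' leaves the flag set to the end,
--     which drops the remainder (same as A's break).
--     """
--     mapping = []
--     plain_chars = []
--     inside_tag = False
--     for i, ch in enumerate(html):
--         if inside_tag:
--             if ch == ">":
--                 inside_tag = False
--         elif ch == "<":
--             inside_tag = True
--         else:
--             mapping.append(i)
--             plain_chars.append(ch)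
--     return "".join(plain_chars), mapping
-- ===== Notes on version B (the rewrite author's own statement) =====
-- stated objective: idiomatic
-- what changed: Replaces the while-loop with str.find jump-past-tag logic by a uniform for-loop finite-state machine with an inside_tag flag, visiting each character exactly once.
import Mathlib
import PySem

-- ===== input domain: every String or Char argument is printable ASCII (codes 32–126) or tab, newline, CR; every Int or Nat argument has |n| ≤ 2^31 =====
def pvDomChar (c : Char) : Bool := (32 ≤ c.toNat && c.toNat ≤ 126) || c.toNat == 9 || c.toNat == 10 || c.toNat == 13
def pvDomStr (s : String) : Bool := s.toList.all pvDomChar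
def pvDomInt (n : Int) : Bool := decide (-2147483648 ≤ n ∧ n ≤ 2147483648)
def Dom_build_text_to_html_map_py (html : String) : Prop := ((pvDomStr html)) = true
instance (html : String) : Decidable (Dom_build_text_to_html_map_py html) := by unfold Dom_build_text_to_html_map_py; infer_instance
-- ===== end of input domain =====

-- B replaces A's while-loop with find('>') jumps by a uniform one-pass finite-state
-- machine with an inside_tag flag (idiomatic; same return value on every input).

-- ===== PORT A =====
-- A's while loop: on '<' jump past the first '>' found from i (break if none),
-- otherwise record (i, char). `List.idxOf? '>'` plays html.find(">", i).
def buildLoopA : List Char → Int → List Char × List Int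
  | [], _ => ([], [])
  | c :: rest, i =>
    if c = '<' then
      match List.idxOf? '>' (c :: rest) with
      | none => ([], [])
      | some j => buildLoopA ((c :: rest).drop (j + 1)) (i + (j : Int) + 1)
    else
      let (s, m) := buildLoopA rest (i + 1)
      (c :: s, i :: m)
  termination_by cs _ => cs.length
  decreasing_by
    all_goals simp [List.length_drop]

def build_text_to_html_map_py (html : String) : String × List Int :=
  let (cs, m) := buildLoopA html.toList 0
  (String.ofList cs, m)

-- ===== PORT B =====
-- B's for-loop FSM: inside_tag flag, each character visited exactly once.
def buildLoopB : List Char → Bool → Int → List Char × List Int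
  | [], _, _ => ([], [])
  | c :: rest, inside, i =>
    if inside then
      buildLoopB rest (if c = '>' then false else true) (i + 1)
    else if c = '<' then
      buildLoopB rest true (i + 1)
    else
      let (s, m) := buildLoopB rest false (i + 1)
      (c :: s, i :: m)

def build_text_to_html_map_py_alt (html : String) : String × List Int :=
  let (cs, m) := buildLoopB html.toList false 0
  (String.ofList cs, m)

-- ===== PRECONDITION & SPEC =====
def Spec_build_text_to_html_map_py (html : String) (out : String × List Int) : Prop := out = build_text_to_html_map_py_alt html
instance (html : String) (out : String × List Int) : Decidable (Spec_build_text_to_html_map_py html out) := by unfold Spec_build_text_to_html_map_py; infer_instance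

-- ===== CLAIM (what is proved, stated in full; the proofs are below) =====
def Claim_equal_build_text_to_html_map_py : Prop := ∀ (html : String), Dom_build_text_to_html_map_py html → Spec_build_text_to_html_map_py html (build_text_to_html_map_py html)

-- ===== LEMMAS AND PROOFS =====

-- Joint invariant, by strong induction on the list length:
-- (1) outside a tag the FSM agrees with A's loop;
-- (2) inside a tag the FSM equals: find the first '>', resume A's loop after it
--     (or return ([],[]) if there is none — A's break).
theorem buildLoop_agree (n : Nat) : ∀ cs : List Char, cs.length ≤ n → ∀ i : Int,
    buildLoopA cs i = buildLoopB cs false i ∧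
    buildLoopB cs true i =
      (match List.idxOf? '>' cs with
       | none => ([], [])
       | some j => buildLoopA (cs.drop (j + 1)) (i + (j : Int) + 1)) := by
  induction n with
  | zero =>
    intro cs hlen i
    have : cs = [] := List.eq_nil_of_length_eq_zero (Nat.le_zero.mp hlen)
    subst this
    simp [buildLoopA, buildLoopB, List.idxOf?]
  | succ n ih =>
    intro cs hlen i
    match cs with
    | [] => simp [buildLoopA, buildLoopB, List.idxOf?]
    | c :: rest =>
      have hr : rest.length ≤ n := by simpa using hlen
      constructor
      · -- (1) buildLoopA (c::rest) i = buildLoopB (c::rest) false i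
        by_cases hc : c = '<'
        · subst hc
          have hidx : List.idxOf? '>' ('<' :: rest)
              = (List.idxOf? '>' rest).map (· + 1) := by
            simp [List.idxOf?_cons]
          rw [show buildLoopB ('<' :: rest) false i
                = buildLoopB rest true (i + 1) from by simp [buildLoopB],
              (ih rest hr (i + 1)).2,
              show buildLoopA ('<' :: rest) i
                = (match List.idxOf? '>' ('<' :: rest) with
                   | none => ([], [])
                   | some j => buildLoopA (('<' :: rest).drop (j + 1)) (i + (j : Int) + 1))
              from by simp [buildLoopA],
              hidx]
          cases hfind : List.idxOf? '>' rest with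
          | none => simp
          | some j =>
            simp only [Option.map_some]
            rw [show ('<' :: rest).drop (j + 1 + 1) = rest.drop (j + 1) from by simp]
            congr 1
            push_cast
            ring
        · rw [show buildLoopA (c :: rest) i
                = (let (s, m) := buildLoopA rest (i + 1); (c :: s, i :: m))
              from by simp [buildLoopA, hc],
              show buildLoopB (c :: rest) false i
                = (let (s, m) := buildLoopB rest false (i + 1); (c :: s, i :: m))
              from by simp [buildLoopB, hc]]
          rw [(ih rest hr (i + 1)).1]
      · -- (2) buildLoopB (c::rest) true i
        by_cases hc : c = '>'
        · subst hc
          rw [show buildLoopB ('>' :: rest) true i = buildLoopB rest false (i + 1)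
              from by simp [buildLoopB]]
          rw [← (ih rest hr (i + 1)).1]
          simp [List.idxOf?_cons]
        · have hidx : List.idxOf? '>' (c :: rest)
              = (List.idxOf? '>' rest).map (· + 1) := by
            simp [List.idxOf?_cons, hc]
          rw [show buildLoopB (c :: rest) true i = buildLoopB rest true (i + 1)
              from by simp [buildLoopB, hc],
              (ih rest hr (i + 1)).2, hidx]
          cases hfind : List.idxOf? '>' rest with
          | none => simp
          | some j =>
            simp only [Option.map_some]
            rw [show (c :: rest).drop (j + 1 + 1) = rest.drop (j + 1) from by simp]
            congr 1
            push_cast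
            ring

-- ===== VERDICT (by name: the statement is the Claim_ definition above) =====
theorem build_text_to_html_map_py_spec : Claim_equal_build_text_to_html_map_py := by
  intro html _
  unfold Spec_build_text_to_html_map_py build_text_to_html_map_py build_text_to_html_map_py_alt
  rw [(buildLoop_agree html.toList.length html.toList le_rfl 0).1]
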